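-- pv_equiv track=rewrite | github.com/owais-ch/Arrays | remove_minimum_number_of_elements.py | minRemove
-- ===== SOURCE A (Python) =====
-- def minRemove(a, b, n, m):
--     dict1=dict()
--     dict2=dict()
--
--     for i in range(n):
--         if a[i] not in dict1:
--             dict1[a[i]]=1
--         else:
--             dict1[a[i]]+=1
--
--     for i in range(m):
--         if b[i] not in dict2:
--             dict2[b[i]]=1
--         else:
--             dict2[b[i]]+=1
--
--     #total1=0
--     #total2=0
--     total=0
--     for i in dict1:
--         if i in dict2:
--             total+=min(dict1[i],dict2[i])
--     return total
-- ===== SOURCE B (Python) =====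
-- def minRemove(a, b, n, m):
--     xs = sorted([a[i] for i in range(n)])
--     ys = sorted([b[i] for i in range(m)])
--     i = 0
--     j = 0
--     total = 0
--     while i < len(xs) and j < len(ys):
--         if xs[i] < ys[j]:
--             i += 1
--         elif ys[j] < xs[i]:
--             j += 1
--         else:
--             total += 1
--             i += 1
--             j += 1
--     return total
-- ===== Notes on version B (the rewrite author's own statement) =====
-- stated objective: alternative
-- what changed: Replaced the two frequency dictionaries and the min-over-shared-keys sum by sorting both index-built prefixes and counting equal pairs with a two-pointer merge.
import Mathlib
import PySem

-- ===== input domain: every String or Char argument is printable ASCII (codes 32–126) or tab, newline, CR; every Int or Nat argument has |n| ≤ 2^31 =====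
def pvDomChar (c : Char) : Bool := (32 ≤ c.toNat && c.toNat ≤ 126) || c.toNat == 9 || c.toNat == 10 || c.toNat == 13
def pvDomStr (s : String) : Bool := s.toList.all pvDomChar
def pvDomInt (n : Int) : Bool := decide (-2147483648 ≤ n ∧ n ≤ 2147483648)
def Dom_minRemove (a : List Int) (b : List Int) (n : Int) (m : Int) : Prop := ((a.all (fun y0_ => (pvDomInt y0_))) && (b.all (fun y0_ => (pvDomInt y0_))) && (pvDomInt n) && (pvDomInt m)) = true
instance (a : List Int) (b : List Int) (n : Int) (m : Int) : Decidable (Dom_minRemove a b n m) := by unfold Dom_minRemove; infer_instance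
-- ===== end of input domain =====

-- B replaces A's two frequency dictionaries by sorting both prefixes and counting
-- equal pairs with a two-pointer merge (alternative algorithm, similar cost).

-- ===== PORT A =====
def minRemove (a : List Int) (b : List Int) (n : Int) (m : Int) : Int :=
  let dict1 := (PySem.List.pyRange 0 n 1).foldl
    (fun d i =>
      let x := PySem.List.pyGetD a i 0
      if !(d.contains x) then d.insert x 1 else d.insert x (d.getD x 0 + 1)) PySem.Dict.empty
  let dict2 := (PySem.List.pyRange 0 m 1).foldl
    (fun d i =>
      let x := PySem.List.pyGetD b i 0
      if !(d.contains x) then d.insert x 1 else d.insert x (d.getD x 0 + 1)) PySem.Dict.empty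
  dict1.keys.foldl
    (fun total k =>
      if dict2.contains k then total + min (dict1.getD k 0) (dict2.getD k 0) else total) 0

-- ===== PORT B =====
-- the while loop over indices i, j: advancing a pointer is dropping the head of that list
def twoPtrCount : List Int → List Int → Int
  | x :: xs, y :: ys =>
    if x < y then twoPtrCount xs (y :: ys)
    else if y < x then twoPtrCount (x :: xs) ys
    else twoPtrCount xs ys + 1
  | _, _ => 0
termination_by xs ys => xs.length + ys.length

def minRemove_alt (a : List Int) (b : List Int) (n : Int) (m : Int) : Int :=
  let xs := PySem.List.sorted ((PySem.List.pyRange 0 n 1).map (fun i => PySem.List.pyGetD a i 0)) (fun x => x) false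
  let ys := PySem.List.sorted ((PySem.List.pyRange 0 m 1).map (fun i => PySem.List.pyGetD b i 0)) (fun x => x) false
  twoPtrCount xs ys

-- ===== PRECONDITION & SPEC =====
-- Pre_: Python A raises IndexError when n exceeds len(a) or m exceeds len(b); nothing else is excluded.
def Pre_minRemove (a : List Int) (b : List Int) (n : Int) (m : Int) : Prop :=
  n ≤ (a.length : Int) ∧ m ≤ (b.length : Int)
instance (a : List Int) (b : List Int) (n : Int) (m : Int) : Decidable (Pre_minRemove a b n m) := by unfold Pre_minRemove; infer_instance

def pvWitness_minRemove : List Int × List Int × Int × Int := ([1, 2, 2, 3], [2, 2, 5], 4, 3)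

def Spec_minRemove (a : List Int) (b : List Int) (n : Int) (m : Int) (out : Int) : Prop := out = minRemove_alt a b n m
instance (a : List Int) (b : List Int) (n : Int) (m : Int) (out : Int) : Decidable (Spec_minRemove a b n m out) := by unfold Spec_minRemove; infer_instance

-- ===== CLAIM (what is proved, stated in full; the proofs are below) =====
def Claim_equal_minRemove : Prop := ∀ (a : List Int) (b : List Int) (n : Int) (m : Int), Dom_minRemove a b n m → Pre_minRemove a b n m → Spec_minRemove a b n m (minRemove a b n m)

-- ===== LEMMAS AND PROOFS =====

-- both sides equal the Int-cast cardinality of the multiset intersection of the two prefixes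

theorem counter_branch_eq (d : PySem.Dict Int Int) (x : Int) :
    (if !(d.contains x) then d.insert x 1 else d.insert x (d.getD x 0 + 1))
      = d.insert x (d.getD x 0 + 1) := by
  by_cases h : d.contains x
  · simp [h]
  · have h' : d.contains x = false := by simpa using h
    simp [h', PySem.Dict.getD_of_not_contains d 0 h']

theorem dictA_eq_counter (l : List Int) :
    l.foldl (fun d x => if !(d.contains x) then d.insert x 1 else d.insert x (d.getD x 0 + 1))
        PySem.Dict.empty = PySem.Dict.counter l := by
  exact (PySem.List.foldl_congr_mem l _ _ _ (fun d x _ => counter_branch_eq d x)).trans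
    (PySem.Dict.foldl_insert_getD_add_one_eq_counter l)

theorem interCard_eq_sum (xs ys : List Int) :
    (((xs : Multiset Int) ∩ (ys : Multiset Int)).card : Int)
      = ∑ k ∈ xs.toFinset ∩ ys.toFinset, min ((xs.count k : Int)) ((ys.count k : Int)) := by
  rw [← Multiset.toFinset_sum_count_eq, Multiset.toFinset_inter]
  push_cast
  refine Finset.sum_congr (by simp) fun k _ => ?_
  rw [Multiset.count_inter]
  push_cast
  simp

theorem A_total_eq (xs ys : List Int) :
    (PySem.Set.ofList xs).foldl
      (fun total k =>
        if (PySem.Dict.counter ys).contains k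
        then total + min ((PySem.Dict.counter xs).getD k 0) ((PySem.Dict.counter ys).getD k 0)
        else total) 0
      = (((xs : Multiset Int) ∩ (ys : Multiset Int)).card : Int) := by
  rw [PySem.List.foldl_if_eq_foldl_filter, PySem.List.foldl_add, interCard_eq_sum, zero_add]
  have hnd : ((PySem.Set.ofList xs).filter (fun k => (PySem.Dict.counter ys).contains k)).Nodup :=
    (PySem.Set.nodup_ofList xs).filter _
  rw [← List.sum_toFinset _ hnd]
  have hset : ((PySem.Set.ofList xs).filter (fun k => (PySem.Dict.counter ys).contains k)).toFinset
      = xs.toFinset ∩ ys.toFinset := by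
    ext k
    simp [PySem.Set.mem_ofList, PySem.Dict.contains_counter]
  rw [hset]
  exact Finset.sum_congr rfl fun k _ => by simp [PySem.Dict.getD_counter]

theorem twoPtr_eq_interCard (xs ys : List Int) :
    xs.Pairwise (· ≤ ·) → ys.Pairwise (· ≤ ·) →
    twoPtrCount xs ys = (((xs : Multiset Int) ∩ (ys : Multiset Int)).card : Int) := by
  induction xs, ys using twoPtrCount.induct with
  | case1 x xs y ys hlt ih =>
    intro hx hy
    have hnm : x ∉ (y :: ys) := by
      intro hmem
      rcases List.mem_cons.mp hmem with h | h
      · omega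
      · exact absurd (List.rel_of_pairwise_cons hy h) (by omega)
    rw [twoPtrCount, if_pos hlt, ih (List.Pairwise.of_cons hx) hy,
      ← Multiset.cons_coe x xs, Multiset.cons_inter_of_neg _ (by simpa using hnm)]
  | case2 x xs y ys hnlt hlt ih =>
    intro hx hy
    have hnm : y ∉ (x :: xs) := by
      intro hmem
      rcases List.mem_cons.mp hmem with h | h
      · omega
      · exact absurd (List.rel_of_pairwise_cons hx h) (by omega)
    have key : ((x :: xs : List Int) : Multiset Int) ∩ ((y :: ys : List Int) : Multiset Int)
        = ((x :: xs : List Int) : Multiset Int) ∩ (ys : Multiset Int) := by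
      rw [Multiset.inter_comm, ← Multiset.cons_coe y ys,
        Multiset.cons_inter_of_neg _ (by rw [Multiset.mem_coe]; exact hnm), Multiset.inter_comm]
    rw [twoPtrCount, if_neg hnlt, if_pos hlt, ih hx (List.Pairwise.of_cons hy), key]
  | case3 x xs y ys hnlt hnlt' ih =>
    intro hx hy
    have hxy : x = y := by omega
    subst hxy
    have hmem : x ∈ ((x :: ys : List Int) : Multiset Int) := by simp
    rw [twoPtrCount, if_neg hnlt, if_neg hnlt', ih (List.Pairwise.of_cons hx) (List.Pairwise.of_cons hy),
      ← Multiset.cons_coe x xs, Multiset.cons_inter_of_pos _ hmem]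
    rw [show (((x :: ys : List Int) : Multiset Int)).erase x = (ys : Multiset Int) by
      rw [← Multiset.cons_coe x ys, Multiset.erase_cons_head]]
    push_cast [Multiset.card_cons]
    ring
  | case4 xs ys h =>
    intro _ _
    cases xs <;> cases ys <;> first
      | exact ((h _ _ _ _ rfl rfl).elim)
      | simp [twoPtrCount]

-- ===== VERDICT (by name: the statement is the Claim_ definition above) =====
theorem minRemove_spec : Claim_equal_minRemove := by
  intro a b n m _ _
  unfold Spec_minRemove minRemove minRemove_alt
  have hA : ∀ (c : List Int) (k : Int),
      (PySem.List.pyRange 0 k 1).foldl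
        (fun d i =>
          if !(d.contains (PySem.List.pyGetD c i 0)) then d.insert (PySem.List.pyGetD c i 0) 1
          else d.insert (PySem.List.pyGetD c i 0) (d.getD (PySem.List.pyGetD c i 0) 0 + 1))
        PySem.Dict.empty
      = PySem.Dict.counter ((PySem.List.pyRange 0 k 1).map (fun i => PySem.List.pyGetD c i 0)) := by
    intro c k
    rw [← dictA_eq_counter]
    exact (List.foldl_map (f := fun i => PySem.List.pyGetD c i 0)
      (g := fun (d : PySem.Dict Int Int) x => if !(d.contains x) then d.insert x 1 else d.insert x (d.getD x 0 + 1))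
      (l := PySem.List.pyRange 0 k 1) (init := PySem.Dict.empty)).symm
  rw [hA a n, hA b m]
  dsimp only
  rw [PySem.Dict.keys_counter, A_total_eq,
    twoPtr_eq_interCard _ _ (PySem.List.sorted_pairwise _ _) (PySem.List.sorted_pairwise _ _),
    Multiset.coe_eq_coe.mpr (PySem.List.sorted_perm _ _ _),
    Multiset.coe_eq_coe.mpr (PySem.List.sorted_perm _ _ _)]
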